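-- pv_equiv track=rewrite | github.com/arclic/PS | programmers/64064/programmers.py | solution
-- ===== SOURCE A (Python) =====
-- def addPermutation(baseList, targetList):
--     permutationList = []
--
--     for t in targetList:
--         for b in baseList:
--             if t not in b:
--                 permutationList.append((b + [t]))
--
--     return permutationList
--
-- def solution(user_id, banned_id):
--     answer = 0
--     answerDict = {}
--
--     for i, banData in enumerate(banned_id):
--         answerDict[i] = []
--         for userData in user_id:
--             if len(banData) == len(userData):
--                 check = True
--                 for idx, char in enumerate(banData):
--                     if char != "*" and userData[idx] != char:
--                         check = False
--
--                 if check: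
--                     answerDict[i].append(userData)
--
--     permutationList = []
--
--     for idx, value in enumerate(answerDict.values()):
--         if idx == 0:
--             for _v in value:
--                 permutationList.append([_v])
--             continue
--         permutationList = addPermutation(permutationList, value)
--
--     answerList = []
--
--     for value in permutationList:
--         if len(value) == len(banned_id) and sorted(value) not in answerList:
--             answerList.append(sorted(value))
--
--     return len(answerList)
-- ===== SOURCE B (Python) =====
-- def solution(user_id, banned_id):
--     def matches(pat, u):
--         return len(pat) == len(u) and all(p == '*' or p == c for p, c in zip(pat, u))
--
--     cands = [[u for u in user_id if matches(p, u)] for p in banned_id]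
--     results = set()
--
--     def dfs(rem, used):
--         if not rem:
--             results.add(tuple(sorted(used)))
--             return
--         for u in rem[0]:
--             if u not in used:
--                 dfs(rem[1:], used + [u])
--
--     dfs(cands, [])
--     return len(results)
-- ===== Notes on version B (the rewrite author's own statement) =====
-- stated objective: alternative
-- what changed: Replaces A's iterative product construction (addPermutation folds materialising the full list of ordered tuples, then a linear-scan dedup of sorted lists) by recursive DFS backtracking over the per-pattern candidate lists that inserts each completed selection, canonicalised as a sorted tuple, into a set.
-- outside the precondition, e.g. on solution(['abc'], []): A returns 0, B returns 1
import Mathlib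
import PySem

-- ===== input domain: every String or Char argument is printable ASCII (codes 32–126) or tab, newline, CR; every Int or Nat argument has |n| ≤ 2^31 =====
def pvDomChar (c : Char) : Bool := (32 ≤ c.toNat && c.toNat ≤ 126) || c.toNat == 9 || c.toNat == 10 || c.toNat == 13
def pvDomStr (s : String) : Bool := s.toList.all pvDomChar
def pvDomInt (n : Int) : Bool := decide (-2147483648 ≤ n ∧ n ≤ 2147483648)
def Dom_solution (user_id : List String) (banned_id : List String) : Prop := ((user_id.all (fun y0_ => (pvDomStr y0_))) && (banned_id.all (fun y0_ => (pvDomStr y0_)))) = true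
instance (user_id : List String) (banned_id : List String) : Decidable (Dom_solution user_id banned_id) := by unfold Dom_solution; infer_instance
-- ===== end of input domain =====

-- B replaces A's iterative product list + linear-scan dedup of sorted tuples by DFS backtracking
-- over per-pattern candidate lists that inserts sorted selections into a set (alternative algorithm).


-- ===== PORT A =====
-- literal port of addPermutation (outer loop over targetList, inner over baseList)
def addPermutationA (baseList : List (List String)) (targetList : List String) : List (List String) :=
  targetList.foldl
    (fun pl t => baseList.foldl
      (fun pl b => if t ∉ b then pl ++ [b ++ [t]] else pl) pl) []

-- the inner character check loop of A; PySem.List.pyGet? is exact here: A only runs this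
-- when the two strings have equal length, so the index is always in range
def checkA (banData userData : List Char) : Bool :=
  (PySem.List.enumerate banData).foldl
    (fun check p =>
      if p.2 ≠ '*' ∧ PySem.List.pyGet? userData p.1 ≠ some p.2 then false else check) true

-- the body of the inner 'for userData in user_id' loop
def innerStepA (i : Int) (ban : String) (d : PySem.Dict Int (List String)) (userData : String) :
    PySem.Dict Int (List String) :=
  if ban.toList.length = userData.toList.length then
    if checkA ban.toList userData.toList then d.modify i [] (fun l => l ++ [userData]) else d
  else d

-- the body of the 'for i, banData in enumerate(banned_id)' loop
def outerStepA (user_id : List String) (d : PySem.Dict Int (List String)) (p : Int × String) :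
    PySem.Dict Int (List String) :=
  user_id.foldl (innerStepA p.1 p.2) (d.insert p.1 [])

def solution (user_id : List String) (banned_id : List String) : Int :=
  let answerDict : PySem.Dict Int (List String) :=
    (PySem.List.enumerate banned_id).foldl (outerStepA user_id) PySem.Dict.empty
  let permutationList : List (List String) :=
    (PySem.List.enumerate answerDict.values).foldl
      (fun pl p =>
        if p.1 = 0 then p.2.foldl (fun pl v => pl ++ [[v]]) pl
        else addPermutationA pl p.2) []
  let answerList : List (List String) :=
    permutationList.foldl
      (fun al value =>
        if value.length = banned_id.length ∧ (PySem.List.sorted value (fun x => x)) ∉ al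
        then al ++ [PySem.List.sorted value (fun x => x)] else al) []
  (answerList.length : Int)

-- ===== PORT B =====
def matchesB (pat u : List Char) : Bool :=
  pat.length == u.length && (pat.zip u).all (fun pc => pc.1 == '*' || pc.1 == pc.2)

-- DFS over the remaining candidate lists; completed selections are added (sorted) to the set
def dfsB (cands : List (List String)) (used : List String) (res : PySem.Set (List String)) :
    PySem.Set (List String) :=
  match cands with
  | [] => PySem.Set.add res (PySem.List.sorted used (fun x => x))
  | c :: rest =>
      c.foldl (fun r u => if u ∈ used then r else dfsB rest (used ++ [u]) r) res

def solution_alt (user_id : List String) (banned_id : List String) : Int :=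
  let cands := banned_id.map (fun p => user_id.filter (fun u => matchesB p.toList u.toList))
  ((dfsB cands [] PySem.Set.empty).length : Int)

-- ===== PRECONDITION & SPEC =====
-- Pre_ excludes only the degenerate empty banned_id, where A returns 0 while B counts the one
-- empty selection (returns 1); with no patterns either value is defensible and neither is specified.
def Pre_solution (user_id : List String) (banned_id : List String) : Prop := banned_id ≠ []
instance (user_id : List String) (banned_id : List String) : Decidable (Pre_solution user_id banned_id) := by unfold Pre_solution; infer_instance

def pvWitness_solution : List String × List String := (["ab", "cd"], ["a*", "*d"])

def Spec_solution (user_id : List String) (banned_id : List String) (out : Int) : Prop := out = solution_alt user_id banned_id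
instance (user_id : List String) (banned_id : List String) (out : Int) : Decidable (Spec_solution user_id banned_id out) := by unfold Spec_solution; infer_instance

-- ===== CLAIM (what is proved, stated in full; the proofs are below) =====
def Claim_equal_solution : Prop := ∀ (user_id : List String) (banned_id : List String), Dom_solution user_id banned_id → Pre_solution user_id banned_id → Spec_solution user_id banned_id (solution user_id banned_id)

-- ===== LEMMAS AND PROOFS =====

-- the per-pattern row of matching users, as A filters it
def rowA (user_id : List String) (ban : String) : List String :=
  user_id.filter (fun u =>
    decide (ban.toList.length = u.toList.length) && checkA ban.toList u.toList)

-- valid selections: Sel used cands x ⇔ x picks one user per candidate list, no user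
-- appearing twice (nor in the prefix 'used')
inductive Sel : List String → List (List String) → List String → Prop
  | nil (used : List String) : Sel used [] []
  | cons {used : List String} {c : List String} {rest : List (List String)} {u : String}
      {x : List String} (hu : u ∈ c) (hnu : u ∉ used) (h : Sel (used ++ [u]) rest x) :
      Sel used (c :: rest) (u :: x)

theorem sel_nil_iff (used : List String) (x : List String) : Sel used [] x ↔ x = [] := by
  constructor
  · rintro ⟨⟩; rfl
  · rintro rfl; exact Sel.nil used

theorem sel_cons_iff (used : List String) (c : List String) (rest : List (List String))
    (x : List String) :
    Sel used (c :: rest) x ↔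
      ∃ u x', x = u :: x' ∧ u ∈ c ∧ u ∉ used ∧ Sel (used ++ [u]) rest x' := by
  constructor
  · rintro ⟨hu, hnu, h⟩; exact ⟨_, _, rfl, by assumption, by assumption, by assumption⟩
  · rintro ⟨u, x', rfl, hu, hnu, h⟩; exact Sel.cons hu hnu h

theorem sel_length {used : List String} {cands : List (List String)} {x : List String}
    (h : Sel used cands x) : x.length = cands.length := by
  induction h with
  | nil => rfl
  | cons _ _ _ ih => simpa using ih


-- ===== A-side: membership in the iterated product =====

theorem mem_addPermutationA_inner (t : String) (base : List (List String)) :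
    ∀ (pl : List (List String)) (y : List String),
      y ∈ base.foldl (fun pl b => if t ∉ b then pl ++ [b ++ [t]] else pl) pl ↔
        y ∈ pl ∨ ∃ b ∈ base, t ∉ b ∧ y = b ++ [t] := by
  induction base with
  | nil => simp
  | cons b bs ih =>
    intro pl y
    simp only [List.foldl_cons]
    rw [ih]
    by_cases hb : t ∈ b
    · simp [hb]
    · simp only [if_pos hb, List.mem_append, List.mem_cons,
        List.not_mem_nil, or_false]
      aesop

theorem mem_addPermutationA (base : List (List String)) (target : List String)
    (y : List String) :
    y ∈ addPermutationA base target ↔ ∃ b ∈ base, ∃ t ∈ target, t ∉ b ∧ y = b ++ [t] := by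
  unfold addPermutationA
  have gen : ∀ (ts : List String) (pl : List (List String)),
      y ∈ ts.foldl (fun pl t => base.foldl
          (fun pl b => if t ∉ b then pl ++ [b ++ [t]] else pl) pl) pl ↔
        y ∈ pl ∨ ∃ t ∈ ts, ∃ b ∈ base, t ∉ b ∧ y = b ++ [t] := by
    intro ts
    induction ts with
    | nil => simp
    | cons t ts ih =>
      intro pl
      simp only [List.foldl_cons]
      rw [ih, mem_addPermutationA_inner]
      simp only [List.mem_cons]
      constructor
      · rintro ((h | ⟨b, hb, ht, hy⟩) | ⟨t', ht', b, hb, htb, hy⟩)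
        · exact Or.inl h
        · exact Or.inr ⟨t, Or.inl rfl, b, hb, ht, hy⟩
        · exact Or.inr ⟨t', Or.inr ht', b, hb, htb, hy⟩
      · rintro (h | ⟨t', (rfl | ht'), b, hb, htb, hy⟩)
        · exact Or.inl (Or.inl h)
        · exact Or.inl (Or.inr ⟨b, hb, htb, hy⟩)
        · exact Or.inr ⟨t', ht', b, hb, htb, hy⟩
  rw [gen]
  simp only [List.not_mem_nil, false_or]
  constructor
  · rintro ⟨t, ht, b, hb, htb, hy⟩; exact ⟨b, hb, t, ht, htb, hy⟩
  · rintro ⟨b, hb, t, ht, htb, hy⟩; exact ⟨t, ht, b, hb, htb, hy⟩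

theorem mem_foldA (rest : List (List String)) :
    ∀ (base : List (List String)) (y : List String),
      y ∈ rest.foldl addPermutationA base ↔
        ∃ b ∈ base, ∃ x, Sel b rest x ∧ y = b ++ x := by
  induction rest with
  | nil =>
    intro base y
    simp [sel_nil_iff]
  | cons c rest ih =>
    intro base y
    simp only [List.foldl_cons]
    rw [ih]
    constructor
    · rintro ⟨b', hb', x, hx, hy⟩
      rw [mem_addPermutationA] at hb'
      obtain ⟨b, hb, t, ht, htb, rfl⟩ := hb'
      refine ⟨b, hb, t :: x, Sel.cons ht htb hx, ?_⟩
      simp [hy, List.append_assoc]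
    · rintro ⟨b, hb, x, hx, hy⟩
      rw [sel_cons_iff] at hx
      obtain ⟨u, x', rfl, hu, hnu, hx'⟩ := hx
      refine ⟨b ++ [u], ?_, x', hx', ?_⟩
      · rw [mem_addPermutationA]; exact ⟨b, hb, u, hu, hnu, rfl⟩
      · simp [hy, List.append_assoc]

def buildA (cands : List (List String)) : List (List String) :=
  match cands with
  | [] => []
  | c :: rest => rest.foldl addPermutationA (c.map (fun v => [v]))

theorem mem_buildA (c : List String) (rest : List (List String)) (y : List String) :
    y ∈ buildA (c :: rest) ↔ ∃ x, Sel [] (c :: rest) x ∧ y = x := by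
  unfold buildA
  rw [mem_foldA]
  constructor
  · rintro ⟨b, hb, x, hx, rfl⟩
    obtain ⟨t, ht, rfl⟩ := List.mem_map.1 hb
    exact ⟨t :: x, Sel.cons ht (List.not_mem_nil) (by simpa using hx), rfl⟩
  · rintro ⟨x, hx, rfl⟩
    rw [sel_cons_iff] at hx
    obtain ⟨u, x', rfl, hu, _, hx'⟩ := hx
    exact ⟨[u], List.mem_map.2 ⟨u, hu, rfl⟩, x', by simpa using hx', rfl⟩

theorem permfold_pos (rest : List (List String)) :
    ∀ (s : Int), 1 ≤ s → ∀ (pl : List (List String)),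
      (PySem.List.enumerate rest s).foldl
          (fun pl p =>
            if p.1 = 0 then p.2.foldl (fun pl v => pl ++ [[v]]) pl
            else addPermutationA pl p.2) pl
        = rest.foldl addPermutationA pl := by
  induction rest with
  | nil => intro s _ pl; simp [PySem.List.enumerate_nil]
  | cons c cs ih =>
    intro s hs pl
    rw [PySem.List.enumerate_cons]
    simp only [List.foldl_cons]
    rw [if_neg (by omega)]
    exact ih (s + 1) (by omega) _

theorem permfold_eq_buildA (vals : List (List String)) :
    (PySem.List.enumerate vals).foldl
        (fun pl p =>
          if p.1 = 0 then p.2.foldl (fun pl v => pl ++ [[v]]) pl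
          else addPermutationA pl p.2) []
      = buildA vals := by
  cases vals with
  | nil => simp [PySem.List.enumerate_nil, buildA]
  | cons c rest =>
    rw [PySem.List.enumerate_cons]
    rw [List.foldl_cons, if_pos rfl, show (0 : Int) + 1 = 1 by omega]
    rw [permfold_pos rest 1 (by omega)]
    have : c.foldl (fun pl v => pl ++ [[v]]) ([] : List (List String))
        = c.map (fun v => [v]) := by
      simpa using PySem.List.foldl_append_singleton_eq_map (fun v => [v]) c []
    rw [this]; rfl


-- ===== A-side: the dict of per-pattern matching users =====

theorem innerStepA_cases (i : Int) (ban : String) (e : PySem.Dict Int (List String))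
    (u : String) :
    innerStepA i ban e u = e ∨ innerStepA i ban e u = e.modify i [] (fun l => l ++ [u]) := by
  unfold innerStepA
  split_ifs <;> simp

theorem innerFold_getD (i : Int) (ban : String) (us : List String) :
    ∀ (e : PySem.Dict Int (List String)), e.contains i = true → ∀ (j : Int),
      (us.foldl (innerStepA i ban) e).getD j []
        = if j = i
          then e.getD i [] ++ us.filter (fun u =>
            decide (ban.toList.length = u.toList.length) && checkA ban.toList u.toList)
          else e.getD j [] := by
  induction us with
  | nil =>
    intro e he j
    simp only [List.foldl_nil, List.filter_nil, List.append_nil]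
    split_ifs with h
    · rw [h]
    · rfl
  | cons u us ih =>
    intro e he j
    rw [List.foldl_cons, List.filter_cons]
    by_cases hl : ban.toList.length = u.toList.length
    · by_cases hc : checkA ban.toList u.toList
      · have hstep : innerStepA i ban e u = e.modify i [] (fun l => l ++ [u]) := by
          unfold innerStepA; rw [if_pos hl, if_pos hc]
        have hpred : (decide (ban.toList.length = u.toList.length)
            && checkA ban.toList u.toList) = true := by simp [hl, hc]
        rw [hstep, ih _ (by rw [PySem.Dict.contains_modify]; simp [he]), hpred]
        by_cases h : j = i
        · subst h; simp
        · simp [PySem.Dict.getD_modify, h]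
      · have hstep : innerStepA i ban e u = e := by
          unfold innerStepA; rw [if_pos hl, if_neg hc]
        have hpred : (decide (ban.toList.length = u.toList.length)
            && checkA ban.toList u.toList) = false := by simp [hc]
        rw [hstep, ih _ he, hpred]
        rfl
    · have hstep : innerStepA i ban e u = e := by
        unfold innerStepA; rw [if_neg hl]
      have hpred : (decide (ban.toList.length = u.toList.length)
          && checkA ban.toList u.toList) = false := by
        rw [decide_eq_false hl, Bool.false_and]
      rw [hstep, ih _ he, hpred]
      rfl

theorem innerFold_contains (i : Int) (ban : String) (us : List String) :
    ∀ (e : PySem.Dict Int (List String)), e.contains i = true → ∀ (j : Int),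
      (us.foldl (innerStepA i ban) e).contains j = e.contains j := by
  induction us with
  | nil => intro e he j; rfl
  | cons u us ih =>
    intro e he j
    rw [List.foldl_cons]
    rcases innerStepA_cases i ban e u with hstep | hstep
    · rw [hstep]; exact ih _ he j
    · rw [hstep, ih _ (by rw [PySem.Dict.contains_modify]; simp [he])]
      rw [PySem.Dict.contains_modify]
      by_cases hj : j = i
      · subst hj; simp [he]
      · simp [hj]

theorem innerFold_keys (i : Int) (ban : String) (us : List String) :
    ∀ (e : PySem.Dict Int (List String)), e.contains i = true →
      (us.foldl (innerStepA i ban) e).keys = e.keys := by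
  induction us with
  | nil => intro e he; rfl
  | cons u us ih =>
    intro e he
    rw [List.foldl_cons]
    rcases innerStepA_cases i ban e u with hstep | hstep
    · rw [hstep]; exact ih _ he
    · rw [hstep, ih _ (by rw [PySem.Dict.contains_modify]; simp [he])]
      rw [PySem.Dict.keys_modify, PySem.Dict.keys_insert_of_contains _ _ he]

theorem outerFold (user_id : List String) (bans : List String) :
    ∀ (s : Int) (d : PySem.Dict Int (List String)),
      (∀ j : Int, s ≤ j → d.contains j = false) →
      ((PySem.List.enumerate bans s).foldl (outerStepA user_id) d).keys
          = d.keys ++ PySem.List.pyRange s (s + bans.length) ∧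
        (∀ j : Int, j < s →
          ((PySem.List.enumerate bans s).foldl (outerStepA user_id) d).getD j []
            = d.getD j []) ∧
        (∀ n : Nat, (hn : n < bans.length) →
          ((PySem.List.enumerate bans s).foldl (outerStepA user_id) d).getD (s + n) []
            = rowA user_id bans[n]) := by
  induction bans with
  | nil =>
    intro s d hfresh
    refine ⟨?_, fun j _ => rfl, fun n hn => absurd hn (by simp)⟩
    simp [PySem.List.enumerate_nil, PySem.List.pyRange]
  | cons ban bans ih =>
    intro s d hfresh
    rw [PySem.List.enumerate_cons]
    simp only [List.foldl_cons]
    set d1 := outerStepA user_id d (s, ban) with hd1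
    have hins : (d.insert s ([] : List String)).contains s = true :=
      PySem.Dict.contains_insert_self d s []
    have hd1keys : d1.keys = d.keys ++ [s] := by
      rw [hd1]
      unfold outerStepA
      rw [innerFold_keys _ _ _ _ hins]
      exact PySem.Dict.keys_insert_of_not_contains d [] (hfresh s le_rfl)
    have hd1getD : ∀ j : Int, d1.getD j []
        = if j = s then rowA user_id ban else d.getD j [] := by
      intro j
      rw [hd1]
      unfold outerStepA
      rw [innerFold_getD _ _ _ _ hins]
      split_ifs with hj
      · subst hj
        rw [PySem.Dict.getD_insert_self]
        rfl
      · exact PySem.Dict.getD_insert_of_ne d [] [] hj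
    have hd1contains : ∀ j : Int, s + 1 ≤ j → d1.contains j = false := by
      intro j hj
      rw [hd1]
      unfold outerStepA
      rw [innerFold_contains _ _ _ _ hins, PySem.Dict.contains_insert]
      have : (j == s) = false := by simp; omega
      rw [this, Bool.false_or]
      exact hfresh j (by omega)
    obtain ⟨hk, hlo, hidx⟩ := ih (s + 1) d1 hd1contains
    have hsplit : PySem.List.pyRange s (s + ((ban :: bans).length : Int))
        = s :: PySem.List.pyRange (s + 1) (s + 1 + (bans.length : Int)) := by
      rw [PySem.List.pyRange_one_cons
        (by simp only [List.length_cons]; push_cast; omega)]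
      congr 1
      simp only [List.length_cons]
      push_cast
      ring_nf
    refine ⟨?_, ?_, ?_⟩
    · rw [hk, hd1keys, hsplit, List.append_assoc]
      simp
    · intro j hj
      rw [hlo j (by omega), hd1getD]
      rw [if_neg (by omega)]
    · intro n hn
      cases n with
      | zero =>
        have : s + (0 : Nat) = s := by push_cast; ring
        rw [this, hlo s (by omega), hd1getD, if_pos rfl]
        rfl
      | succ m =>
        have hm : m < bans.length := by simpa using hn
        have := hidx m hm
        have harith : s + ((m + 1 : Nat) : Int) = s + 1 + (m : Int) := by push_cast; ring
        rw [harith, this]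
        rfl

theorem values_eq (user_id banned_id : List String) :
    ((PySem.List.enumerate banned_id).foldl (outerStepA user_id) PySem.Dict.empty).values
      = banned_id.map (rowA user_id) := by
  obtain ⟨hk, _, hidx⟩ := outerFold user_id banned_id 0 PySem.Dict.empty
    (fun j _ => PySem.Dict.contains_empty j)
  set d' := (PySem.List.enumerate banned_id).foldl (outerStepA user_id) PySem.Dict.empty
    with hd'
  have hkeys : d'.keys = PySem.List.pyRange 0 banned_id.length := by
    rw [hk, PySem.Dict.keys_empty, List.nil_append, zero_add]
  have hnodup : d'.keys.Nodup := by
    rw [hkeys]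
    rw [show PySem.List.pyRange 0 (banned_id.length : Int)
        = List.map (fun p => p.1) (PySem.List.enumerate banned_id 0) from by
      rw [PySem.List.map_fst_enumerate]; norm_num]
    have hpw := PySem.List.pairwise_lt_enumerate banned_id 0
    exact (hpw.map _ (fun a b h => by exact h)).imp (fun h => by omega)
  rw [PySem.Dict.values_eq_map_keys d' hnodup []]
  rw [hkeys, PySem.List.pyRange_zero_natCast, List.map_map]
  apply List.ext_getElem
  · simp
  · intro n h1 h2
    simp only [List.getElem_map, List.getElem_range, Function.comp_apply]
    have h3 := hidx n (by simpa using h2)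
    rw [zero_add] at h3
    exact h3


-- ===== the two matching predicates agree =====

theorem checkA_foldl (u : List Char) (l : List (Int × Char)) :
    ∀ acc : Bool,
      l.foldl (fun check p =>
          if p.2 ≠ '*' ∧ PySem.List.pyGet? u p.1 ≠ some p.2 then false else check) acc
        = (acc && l.all (fun p =>
            decide ¬(p.2 ≠ '*' ∧ PySem.List.pyGet? u p.1 ≠ some p.2))) := by
  induction l with
  | nil => intro acc; simp
  | cons p l ih =>
    intro acc
    rw [List.foldl_cons, ih, List.all_cons]
    by_cases hp : p.2 ≠ '*' ∧ PySem.List.pyGet? u p.1 ≠ some p.2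
    · rw [if_pos hp]
      simp [hp.1, hp.2]
    · rw [if_neg hp]
      simp [hp]

theorem checkA_eq_all (ban u : List Char) :
    checkA ban u = (PySem.List.enumerate ban).all
      (fun p => decide ¬(p.2 ≠ '*' ∧ PySem.List.pyGet? u p.1 ≠ some p.2)) := by
  unfold checkA
  rw [checkA_foldl]
  simp

theorem row_pred_eq (ban u : List Char) :
    (decide (ban.length = u.length) && checkA ban u) = matchesB ban u := by
  unfold matchesB
  by_cases hl : ban.length = u.length
  · rw [checkA_eq_all]
    have hlen : ∀ i, i < ban.length → i < u.length := fun i h => hl ▸ h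
    rw [show (decide (ban.length = u.length)) = true by simp [hl],
        show (ban.length == u.length) = true by simp [hl]]
    simp only [Bool.true_and]
    rw [Bool.eq_iff_iff, List.all_eq_true, List.all_eq_true]
    constructor
    · intro hall pc hpc
      obtain ⟨i, hi, rfl⟩ := List.mem_iff_getElem.1 hpc
      rw [List.getElem_zip]
      have hib : i < ban.length := by
        rw [List.length_zip] at hi
        omega
      have h := hall (((i : Nat) : Int), ban[i]) (by
        rw [PySem.List.mem_enumerate_iff]
        exact ⟨i, hib, by simp⟩)
      have hget : PySem.List.pyGet? u ((i : Nat) : Int) = some (u[i]'(hlen i hib)) := by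
        rw [PySem.List.pyGet?_natCast]
        exact List.getElem?_eq_getElem (hlen i hib)
      simp only [hget, ne_eq, Option.some.injEq, not_and, not_not,
        decide_eq_true_eq] at h
      by_cases hstar : ban[i] = '*'
      · simp [hstar]
      · simp [h hstar]
    · intro hall p hp
      rw [PySem.List.mem_enumerate_iff] at hp
      obtain ⟨k, hk, rfl⟩ := hp
      have hku : k < u.length := hlen k hk
      have hz : (ban[k], u[k]) ∈ ban.zip u := by
        rw [List.mem_iff_getElem]
        refine ⟨k, by rw [List.length_zip]; omega, by rw [List.getElem_zip]⟩
      have h := hall _ hz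
      simp only [Bool.or_eq_true, beq_iff_eq] at h
      have hget : PySem.List.pyGet? u ((0 : Int) + (k : Nat)) = some u[k] := by
        rw [zero_add, PySem.List.pyGet?_natCast]
        exact List.getElem?_eq_getElem hku
      simp only [hget, ne_eq, Option.some.injEq, not_and, not_not,
        decide_eq_true_eq]
      intro hstar
      rcases h with h | h
      · exact absurd h hstar
      · exact h.symm
  · rw [show (decide (ban.length = u.length)) = false from decide_eq_false hl,
        show (ban.length == u.length) = false by simpa using hl]
    simp

-- ===== B-side: membership in the DFS result set =====

theorem mem_dfsB (cands : List (List String)) :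
    ∀ (used : List String) (res : PySem.Set (List String)) (y : List String),
      y ∈ dfsB cands used res ↔
        y ∈ res ∨ ∃ x, Sel used cands x ∧
          y = PySem.List.sorted (used ++ x) (fun a => a) := by
  induction cands with
  | nil =>
    intro used res y
    simp only [dfsB, PySem.Set.mem_add, sel_nil_iff]
    constructor
    · rintro (h | h)
      · exact Or.inl h
      · exact Or.inr ⟨[], rfl, by simpa using h⟩
    · rintro (h | ⟨x, rfl, h⟩)
      · exact Or.inl h
      · exact Or.inr (by simpa using h)
  | cons c rest ih =>
    intro used res y
    have hloop : ∀ (cs : List String) (res : PySem.Set (List String)),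
        y ∈ cs.foldl (fun r u => if u ∈ used then r else dfsB rest (used ++ [u]) r) res ↔
          y ∈ res ∨ ∃ u ∈ cs, u ∉ used ∧ ∃ x, Sel (used ++ [u]) rest x ∧
            y = PySem.List.sorted (used ++ u :: x) (fun a => a) := by
      intro cs
      induction cs with
      | nil => intro res; simp
      | cons u cs ihc =>
        intro res
        rw [List.foldl_cons]
        by_cases hu : u ∈ used
        · rw [if_pos hu, ihc]
          simp only [List.mem_cons]
          constructor
          · rintro (h | ⟨u', hu', hn, hx⟩)
            · exact Or.inl h
            · exact Or.inr ⟨u', Or.inr hu', hn, hx⟩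
          · rintro (h | ⟨u', (rfl | hu'), hn, hx⟩)
            · exact Or.inl h
            · exact absurd hu hn
            · exact Or.inr ⟨u', hu', hn, hx⟩
        · rw [if_neg hu, ihc, ih]
          simp only [List.mem_cons]
          constructor
          · rintro ((h | ⟨x, hx, hy⟩) | ⟨u', hu', hn, hx⟩)
            · exact Or.inl h
            · exact Or.inr ⟨u, Or.inl rfl, hu, x, hx, by
                rw [hy]; simp [List.append_assoc]⟩
            · exact Or.inr ⟨u', Or.inr hu', hn, hx⟩
          · rintro (h | ⟨u', (rfl | hu'), hn, x, hx, hy⟩)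
            · exact Or.inl (Or.inl h)
            · exact Or.inl (Or.inr ⟨x, hx, by rw [hy]; simp [List.append_assoc]⟩)
            · exact Or.inr ⟨u', hu', hn, x, hx, hy⟩
    rw [show dfsB (c :: rest) used res
        = c.foldl (fun r u => if u ∈ used then r else dfsB rest (used ++ [u]) r) res
        from rfl]
    rw [hloop]
    constructor
    · rintro (h | ⟨u, hu, hn, x, hx, hy⟩)
      · exact Or.inl h
      · exact Or.inr ⟨u :: x, Sel.cons hu hn hx, hy⟩
    · rintro (h | ⟨x, hx, hy⟩)
      · exact Or.inl h
      · rw [sel_cons_iff] at hx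
        obtain ⟨u, x', rfl, hu, hn, hx'⟩ := hx
        exact Or.inr ⟨u, hu, hn, x', hx', hy⟩

theorem nodup_dfsB (cands : List (List String)) :
    ∀ (used : List String) (res : PySem.Set (List String)),
      res.Nodup → (dfsB cands used res).Nodup := by
  induction cands with
  | nil =>
    intro used res h
    exact PySem.Set.nodup_add _ _ h
  | cons c rest ih =>
    intro used res h
    rw [show dfsB (c :: rest) used res
        = c.foldl (fun r u => if u ∈ used then r else dfsB rest (used ++ [u]) r) res
        from rfl]
    induction c generalizing res with
    | nil => exact h
    | cons u cs ihc =>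
      rw [List.foldl_cons]
      by_cases hu : u ∈ used
      · rw [if_pos hu]; exact ihc _ h
      · rw [if_neg hu]; exact ihc _ (ih _ _ h)

-- ===== A-side: the final dedup loop =====

theorem answerList_spec (k : Nat) : ∀ (pl : List (List String)),
    (∀ v ∈ pl, v.length = k) →
    ∀ acc : List (List String), acc.Nodup →
      (pl.foldl (fun al value =>
          if value.length = k ∧ (PySem.List.sorted value (fun x => x)) ∉ al
          then al ++ [PySem.List.sorted value (fun x => x)] else al) acc).Nodup ∧
      ∀ y, (y ∈ pl.foldl (fun al value =>
          if value.length = k ∧ (PySem.List.sorted value (fun x => x)) ∉ al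
          then al ++ [PySem.List.sorted value (fun x => x)] else al) acc ↔
        y ∈ acc ∨ ∃ v ∈ pl, y = PySem.List.sorted v (fun x => x)) := by
  intro pl
  induction pl with
  | nil => intro _ acc hacc; simpa using hacc
  | cons v vs ih =>
    intro hlen acc hacc
    have hv : v.length = k := hlen v (List.mem_cons_self)
    have hlen' : ∀ w ∈ vs, w.length = k := fun w hw => hlen w (List.mem_cons_of_mem v hw)
    rw [List.foldl_cons]
    by_cases hs : PySem.List.sorted v (fun x => x) ∈ acc
    · rw [if_neg (by intro hcon; exact hcon.2 hs)]
      obtain ⟨hnd, hmem⟩ := ih hlen' acc hacc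
      refine ⟨hnd, fun y => ?_⟩
      rw [hmem y]
      simp only [List.mem_cons]
      constructor
      · rintro (h | ⟨w, hw, hy⟩)
        · exact Or.inl h
        · exact Or.inr ⟨w, Or.inr hw, hy⟩
      · rintro (h | ⟨w, (rfl | hw), hy⟩)
        · exact Or.inl h
        · exact Or.inl (hy ▸ hs)
        · exact Or.inr ⟨w, hw, hy⟩
    · rw [if_pos ⟨hv, hs⟩]
      have hacc' : (acc ++ [PySem.List.sorted v (fun x => x)]).Nodup := by
        simp [List.nodup_append, hacc]
        intro a ha hae
        exact hs (hae ▸ ha)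
      obtain ⟨hnd, hmem⟩ := ih hlen' _ hacc'
      refine ⟨hnd, fun y => ?_⟩
      rw [hmem y]
      simp only [List.mem_append, List.mem_cons, List.not_mem_nil, or_false]
      constructor
      · rintro ((h | h) | ⟨w, hw, hy⟩)
        · exact Or.inl h
        · exact Or.inr ⟨v, Or.inl rfl, h⟩
        · exact Or.inr ⟨w, Or.inr hw, hy⟩
      · rintro (h | ⟨w, (rfl | hw), hy⟩)
        · exact Or.inl (Or.inl h)
        · exact Or.inl (Or.inr hy)
        · exact Or.inr ⟨w, hw, hy⟩

theorem length_eq_of_nodup_of_mem_iff (l1 l2 : List (List String))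
    (h1 : l1.Nodup) (h2 : l2.Nodup) (h : ∀ y, y ∈ l1 ↔ y ∈ l2) :
    l1.length = l2.length := by
  rw [← List.toFinset_card_of_nodup h1, ← List.toFinset_card_of_nodup h2]
  congr 1
  ext y
  simp [h y]

theorem solutionA_eq (user_id banned_id : List String) :
    solution user_id banned_id =
      (((buildA (banned_id.map (rowA user_id))).foldl
          (fun al value =>
            if value.length = banned_id.length ∧
                (PySem.List.sorted value (fun x => x)) ∉ al
            then al ++ [PySem.List.sorted value (fun x => x)] else al) []).length : Int) := by
  unfold solution
  simp only [values_eq, permfold_eq_buildA]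

theorem solution_spec : Claim_equal_solution := by
  unfold Claim_equal_solution
  intro user_id banned_id _ hpre
  unfold Spec_solution solution_alt
  rw [solutionA_eq]
  have hrow : banned_id.map (rowA user_id)
      = banned_id.map (fun p => user_id.filter (fun u => matchesB p.toList u.toList)) := by
    apply List.map_congr_left
    intro ban _
    unfold rowA
    apply List.filter_congr
    intro u _
    exact row_pred_eq ban.toList u.toList
  rw [hrow] at *
  cases banned_id with
  | nil => exact absurd rfl hpre
  | cons b bs =>
    rw [List.map_cons] at hrow ⊢
    set c := user_id.filter (fun u => matchesB b.toList u.toList) with hc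
    set crest := bs.map (fun p => user_id.filter (fun u => matchesB p.toList u.toList))
      with hcrest
    have hlenperm : ∀ v ∈ buildA (c :: crest), v.length = (b :: bs).length := by
      intro v hv
      rw [mem_buildA] at hv
      obtain ⟨x, hx, rfl⟩ := hv
      rw [sel_length hx]
      simp [hcrest]
    obtain ⟨hndA, hmemA⟩ :=
      answerList_spec (b :: bs).length (buildA (c :: crest)) hlenperm [] List.nodup_nil
    have hndB := nodup_dfsB (c :: crest) [] PySem.Set.empty List.nodup_nil
    have heq : ∀ y, (y ∈ (buildA (c :: crest)).foldl
        (fun al value =>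
          if value.length = (b :: bs).length ∧
              (PySem.List.sorted value (fun x => x)) ∉ al
          then al ++ [PySem.List.sorted value (fun x => x)] else al) []
        ↔ y ∈ dfsB (c :: crest) [] PySem.Set.empty) := by
      intro y
      rw [hmemA y, mem_dfsB]
      simp only [List.not_mem_nil, false_or, List.nil_append]
      constructor
      · rintro ⟨v, hv, hy⟩
        rw [mem_buildA] at hv
        obtain ⟨x, hx, hxy⟩ := hv
        rw [← hxy] at hx
        exact Or.inr ⟨v, hx, hy⟩
      · rintro (h | ⟨x, hx, hy⟩)
        · exact absurd h (List.not_mem_nil)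
        · exact ⟨x, (mem_buildA _ _ _).2 ⟨x, hx, rfl⟩, hy⟩
    have hfin := length_eq_of_nodup_of_mem_iff _ _ hndA hndB heq
    show _ = ((dfsB (c :: crest) [] PySem.Set.empty).length : Int)
    exact_mod_cast hfin
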